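-- pv_equiv track=rewrite | github.com/Confused-coder1919/Thales-optronic-video-indexing | backend/src/entity_indexing/processing.py | _filter_consecutive
-- ===== SOURCE A (Python) =====
-- from typing import Dict, List, Optional, Tuple
--
-- def _filter_consecutive(indices: List[int], min_consecutive: int) -> List[int]:
--     if not indices:
--         return []
--     indices = sorted(indices)
--     kept: List[int] = []
--     run = [indices[0]]
--     last = indices[0]
--     for idx in indices[1:]:
--         if idx == last + 1:
--             run.append(idx)
--         else:
--             if len(run) >= min_consecutive:
--                 kept.extend(run)
--             run = [idx]
--         last = idx
--     if len(run) >= min_consecutive: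
--         kept.extend(run)
--     return kept
-- ===== SOURCE B (Python) =====
-- from typing import List
--
-- def _filter_consecutive(indices: List[int], min_consecutive: int) -> List[int]:
--     xs = sorted(indices)
--     breaks = [i + 1 for i, (u, v) in enumerate(zip(xs, xs[1:])) if v != u + 1]
--     bounds = [0] + breaks + [len(xs)]
--     out: List[int] = []
--     for a, b in zip(bounds, bounds[1:]):
--         if b - a >= min_consecutive:
--             out.extend(xs[a:b])
--     return out
-- ===== Notes on version B (the rewrite author's own statement) =====
-- stated objective: alternative
-- what changed: B replaces A's kept/run/last state machine with a staged positional computation: it derives the break positions of the sorted list from adjacent pairs, turns them into (start, end) boundary pairs, and emits each long-enough segment as a slice; no run buffer or last-value tracking exists.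
import Mathlib
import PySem

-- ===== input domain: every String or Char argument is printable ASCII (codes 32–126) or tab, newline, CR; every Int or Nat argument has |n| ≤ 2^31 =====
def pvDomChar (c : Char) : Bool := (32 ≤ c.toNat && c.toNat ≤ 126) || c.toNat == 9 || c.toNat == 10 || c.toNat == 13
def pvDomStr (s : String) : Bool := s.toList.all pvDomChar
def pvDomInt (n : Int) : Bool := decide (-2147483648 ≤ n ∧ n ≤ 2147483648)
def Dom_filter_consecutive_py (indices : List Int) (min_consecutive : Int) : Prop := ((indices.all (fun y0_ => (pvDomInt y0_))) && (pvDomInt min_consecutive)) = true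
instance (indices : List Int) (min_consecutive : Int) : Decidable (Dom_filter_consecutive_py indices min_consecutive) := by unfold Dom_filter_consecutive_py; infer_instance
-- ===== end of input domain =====

-- B replaces A's kept/run/last state machine by a staged positional computation (break
-- positions from adjacent pairs, then boundary pairs, then slices); objective: alternative.

-- ===== PORT A =====
-- one loop step of A: state = (kept, run, last)
def pvStepA (min_consecutive : Int) (st : List Int × List Int × Int) (idx : Int) :
    List Int × List Int × Int :=
  if idx = st.2.2 + 1 then (st.1, st.2.1 ++ [idx], idx)
  else if min_consecutive ≤ (st.2.1.length : Int) then (st.1 ++ st.2.1, [idx], idx)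
  else (st.1, [idx], idx)

def filter_consecutive_py (indices : List Int) (min_consecutive : Int) : List Int :=
  if indices = [] then []
  else
    match PySem.List.sorted indices (fun x => x) false with
    | [] => []  -- unreachable: sorted of a nonempty list is nonempty
    | h :: t =>
      let st := t.foldl (pvStepA min_consecutive) ([], [h], h)
      if min_consecutive ≤ (st.2.1.length : Int) then st.1 ++ st.2.1 else st.1

-- ===== PORT B =====
def filter_consecutive_py_alt (indices : List Int) (min_consecutive : Int) : List Int :=
  let xs := PySem.List.sorted indices (fun x => x) false
  -- breaks = [i + 1 for i, (u, v) in enumerate(zip(xs, xs[1:])) if v != u + 1]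
  let breaks : List Int :=
    ((PySem.List.enumerate (xs.zip (PySem.List.slice xs (some 1) none)) 0).filter
      (fun p => !(p.2.2 == p.2.1 + 1))).map (fun p => p.1 + 1)
  -- bounds = [0] + breaks + [len(xs)]
  let bounds : List Int := [0] ++ breaks ++ [(xs.length : Int)]
  -- for a, b in zip(bounds, bounds[1:]): if b - a >= min_consecutive: out.extend(xs[a:b])
  (bounds.zip (PySem.List.slice bounds (some 1) none)).foldl
    (fun out ab => if min_consecutive ≤ ab.2 - ab.1
      then out ++ PySem.List.slice xs (some ab.1) (some ab.2) else out) []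

-- ===== PRECONDITION & SPEC =====
def Spec_filter_consecutive_py (indices : List Int) (min_consecutive : Int) (out : List Int) : Prop := out = filter_consecutive_py_alt indices min_consecutive
instance (indices : List Int) (min_consecutive : Int) (out : List Int) : Decidable (Spec_filter_consecutive_py indices min_consecutive out) := by unfold Spec_filter_consecutive_py; infer_instance

-- ===== CLAIM (what is proved, stated in full; the proofs are below) =====
def Claim_equal_filter_consecutive_py : Prop := ∀ (indices : List Int) (min_consecutive : Int), Dom_filter_consecutive_py indices min_consecutive → Spec_filter_consecutive_py indices min_consecutive (filter_consecutive_py indices min_consecutive)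

-- ===== LEMMAS AND PROOFS =====

-- run partition of a sorted list: pvChop last t = (rest of the run continuing after last, remainder)
def pvChop : Int → List Int → List Int × List Int
  | _, [] => ([], [])
  | last, y :: t => if y = last + 1 then (y :: (pvChop y t).1, (pvChop y t).2) else ([], y :: t)

theorem pvChop_snd_length (last : Int) (t : List Int) : (pvChop last t).2.length ≤ t.length := by
  induction t generalizing last with
  | nil => simp [pvChop]
  | cons y t ih =>
    by_cases h : y = last + 1
    · simp only [pvChop, if_pos h]
      exact (ih y).trans (by simp)
    · simp [pvChop, h]

theorem pvChop_append (last : Int) (t : List Int) : (pvChop last t).1 ++ (pvChop last t).2 = t := by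
  induction t generalizing last with
  | nil => simp [pvChop]
  | cons y t ih =>
    by_cases h : y = last + 1
    · simp only [pvChop, if_pos h, List.cons_append, List.cons.injEq, true_and]
      exact ih y
    · simp [pvChop, h]

-- the maximal consecutive runs of a list
def pvPart : List Int → List (List Int)
  | [] => []
  | x :: t => (x :: (pvChop x t).1) :: pvPart (pvChop x t).2
termination_by l => l.length
decreasing_by exact Nat.lt_succ_of_le (pvChop_snd_length x t)

theorem pvPart_nil : pvPart [] = [] := by rw [pvPart]

theorem pvPart_cons (x : Int) (t : List Int) :
    pvPart (x :: t) = (x :: (pvChop x t).1) :: pvPart (pvChop x t).2 := by rw [pvPart]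

-- keep the runs of length ≥ m, flattened
def pvKeep (m : Int) (rs : List (List Int)) : List Int :=
  (rs.filter (fun r => m ≤ (r.length : Int))).flatten

theorem pvKeep_nil (m : Int) : pvKeep m [] = [] := rfl

theorem pvKeep_cons (m : Int) (r : List Int) (rs : List (List Int)) :
    pvKeep m (r :: rs) = (if m ≤ (r.length : Int) then r else []) ++ pvKeep m rs := by
  unfold pvKeep
  by_cases h : m ≤ (r.length : Int) <;> simp [h]

-- ===== A side: the state machine computes pvKeep ∘ pvPart =====
theorem pvMainA (m : Int) (t : List Int) :
    ∀ (kept run : List Int) (last : Int),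
    (let st := t.foldl (pvStepA m) (kept, run, last);
     if m ≤ (st.2.1.length : Int) then st.1 ++ st.2.1 else st.1)
      = kept ++ pvKeep m ((run ++ (pvChop last t).1) :: pvPart (pvChop last t).2) := by
  induction t with
  | nil =>
    intro kept run last
    simp only [List.foldl_nil, pvChop, pvPart_nil, pvKeep_cons, pvKeep_nil, List.append_nil]
    split <;> simp
  | cons x t ih =>
    intro kept run last
    simp only [List.foldl_cons]
    by_cases hx : x = last + 1
    · have hA : pvStepA m (kept, run, last) x = (kept, run ++ [x], x) := by
        unfold pvStepA; simp [hx]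
      rw [hA, ih kept (run ++ [x]) x]
      simp [pvChop, hx, List.append_assoc]
    · have hA : pvStepA m (kept, run, last) x
          = (if m ≤ ((run.length : Int)) then kept ++ run else kept, [x], x) := by
        unfold pvStepA; split
        · exact absurd ‹x = last + 1› hx
        · split <;> simp
      rw [hA, ih _ [x] x]
      have hc : pvChop last (x :: t) = ([], x :: t) := by simp [pvChop, hx]
      rw [hc, pvPart_cons]
      simp only [List.append_nil, List.singleton_append]
      rw [pvKeep_cons m run]
      by_cases hm : m ≤ ((run.length : Nat) : Int) <;> simp [hm, List.append_assoc]

theorem pvA_eq (indices : List Int) (m : Int) :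
    filter_consecutive_py indices m
      = pvKeep m (pvPart (PySem.List.sorted indices (fun x => x) false)) := by
  unfold filter_consecutive_py
  by_cases hnil : indices = []
  · subst hnil
    simp [PySem.List.sorted_eq_nil_iff ([] : List Int) (fun x => x) false |>.mpr rfl, pvPart_nil,
      pvKeep_nil]
  · simp only [hnil, if_false]
    cases hs : PySem.List.sorted indices (fun x => x) false with
    | nil => exact absurd ((PySem.List.sorted_eq_nil_iff indices (fun x => x) false).mp hs) hnil
    | cons h t =>
      have hm := pvMainA m t [] [h] h
      simp only [List.nil_append, List.singleton_append] at hm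
      exact hm.trans (by rw [pvPart_cons])

-- ===== B side =====
-- the segments (start, end) of the maximal runs, with a running offset
def pvSegs : Nat → List Int → List (Nat × Nat)
  | _, [] => []
  | i, x :: t =>
    (i, i + 1 + (pvChop x t).1.length) :: pvSegs (i + 1 + (pvChop x t).1.length) (pvChop x t).2
termination_by _ l => l.length
decreasing_by exact Nat.lt_succ_of_le (pvChop_snd_length x t)

theorem pvSegs_nil (i : Nat) : pvSegs i [] = [] := by rw [pvSegs]

theorem pvSegs_cons (i : Nat) (x : Int) (t : List Int) :
    pvSegs i (x :: t)
      = (i, i + 1 + (pvChop x t).1.length)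
        :: pvSegs (i + 1 + (pvChop x t).1.length) (pvChop x t).2 := by rw [pvSegs]

-- B's break-position expression, with a general enumerate start
def pvEAux (s : Int) (l : List Int) : List Int :=
  ((PySem.List.enumerate (l.zip (PySem.List.slice l (some 1) none)) s).filter
      (fun p => !(p.2.2 == p.2.1 + 1))).map (fun p => p.1 + 1)

theorem pvEAux_single (s : Int) (x : Int) : pvEAux s [x] = [] := rfl

theorem pvEAux_cons2 (s u v : Int) (t : List Int) :
    pvEAux s (u :: v :: t) = (if v = u + 1 then [] else [s + 1]) ++ pvEAux (s + 1) (v :: t) := by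
  unfold pvEAux
  rw [PySem.List.slice_from_one, PySem.List.slice_from_one]
  simp only [List.tail_cons, List.zip_cons_cons, PySem.List.enumerate_cons, List.filter_cons]
  by_cases h : v = u + 1 <;> simp [h]

theorem pvEAux_eq_segs (t : List Int) : ∀ (x : Int) (i : Nat),
    pvEAux (i : Int) (x :: t) = (pvSegs i (x :: t)).tail.map (fun ab => (ab.1 : Int)) := by
  induction t with
  | nil =>
    intro x i
    rw [pvEAux_single, pvSegs_cons]
    simp [pvChop, pvSegs_nil]
  | cons y t ih =>
    intro x i
    rw [pvEAux_cons2]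
    by_cases h : y = x + 1
    · rw [if_pos h, List.nil_append]
      have hc : pvChop x (y :: t) = (y :: (pvChop y t).1, (pvChop y t).2) := by
        simp [pvChop, h]
      rw [show ((i : Int) + 1) = ((i + 1 : Nat) : Int) by push_cast; ring, ih y (i + 1)]
      rw [pvSegs_cons, pvSegs_cons, hc]
      simp only [List.tail_cons, List.length_cons]
      congr 2
      omega
    · rw [if_neg h]
      have hc : pvChop x (y :: t) = ([], y :: t) := by simp [pvChop, h]
      rw [pvSegs_cons, hc]
      simp only [List.length_nil, Nat.add_zero, List.tail_cons]
      rw [show ((i : Int) + 1) = ((i + 1 : Nat) : Int) by push_cast; ring, ih y (i + 1)]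
      rw [pvSegs_cons]
      simp

-- zipping B's bounds list with its tail yields exactly the segment pairs
theorem pvZip_eq_segs : ∀ (n : Nat) (t : List Int) (x : Int), t.length ≤ n → ∀ (i : Nat),
    (((i : Int) :: ((pvSegs i (x :: t)).tail.map (fun ab => (ab.1 : Int))
        ++ [((i + (x :: t).length : Nat) : Int)])).zip
      ((pvSegs i (x :: t)).tail.map (fun ab => (ab.1 : Int))
        ++ [((i + (x :: t).length : Nat) : Int)]))
      = (pvSegs i (x :: t)).map (fun ab => ((ab.1 : Int), (ab.2 : Int))) := by
  intro n
  induction n with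
  | zero =>
    intro t x ht i
    have : t = [] := List.length_eq_zero_iff.mp (Nat.le_zero.mp ht)
    subst this
    rw [pvSegs_cons]
    simp [pvChop, pvSegs_nil]
  | succ n ihn =>
    intro t x ht i
    rcases hch : pvChop x t with ⟨c1, c2⟩
    have htp := pvChop_append x t
    rw [hch] at htp
    simp only [] at htp
    subst htp
    rcases c2 with _ | ⟨y, t2⟩
    · -- a single run
      rw [pvSegs_cons, hch]
      simp only [List.append_nil, pvSegs_nil, List.tail_cons, List.map_nil, List.nil_append]
      rw [show i + (x :: c1).length = i + 1 + c1.length from by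
        simp only [List.length_cons]; omega]
      simp [List.zip_cons_cons]
    · -- at least two runs
      rw [pvSegs_cons, hch]
      simp only [List.tail_cons, List.map_cons]
      have hlt : t2.length ≤ n := by
        simp only [List.length_append, List.length_cons] at ht
        omega
      have key := ihn t2 y hlt (i + 1 + c1.length)
      rw [show i + (x :: (c1 ++ y :: t2)).length = i + 1 + c1.length + (y :: t2).length from by
        simp only [List.length_cons, List.length_append]; omega]
      rw [pvSegs_cons (i + 1 + c1.length) y t2] at key ⊢
      simp only [List.tail_cons, List.map_cons, List.cons_append] at key ⊢
      rw [List.zip_cons_cons, key]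

-- converting a guarded flatMap into filter-then-flatMap
theorem pvFlatMap_if {α β : Type} (p : α → Prop) [DecidablePred p] (g : α → List β)
    (ps : List α) :
    ps.flatMap (fun x => if p x then g x else [])
      = (ps.filter (fun x => decide (p x))).flatMap g := by
  induction ps with
  | nil => rfl
  | cons a ps ih =>
    by_cases h : p a <;> simp [List.flatMap_cons, h, ih]

-- the segment slices of any list compute pvKeep ∘ pvPart
theorem pvSegs_flatMap (m : Int) : ∀ (n : Nat) (l : List Int), l.length ≤ n →
    ∀ (ys : List Int) (i : Nat), ys.drop i = l →
    (pvSegs i l).flatMap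
        (fun ab => if m ≤ (ab.2 : Int) - (ab.1 : Int)
          then (ys.drop ab.1).take (ab.2 - ab.1) else [])
      = pvKeep m (pvPart l) := by
  intro n
  induction n with
  | zero =>
    intro l hl ys i hdrop
    have : l = [] := List.length_eq_zero_iff.mp (Nat.le_zero.mp hl)
    subst this
    rw [pvSegs_nil, pvPart_nil]
    rfl
  | succ n ihn =>
    intro l hl ys i hdrop
    rcases l with _ | ⟨x, t⟩
    · rw [pvSegs_nil, pvPart_nil]
      rfl
    · rcases hch : pvChop x t with ⟨c1, c2⟩
      have htp := pvChop_append x t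
      rw [hch] at htp
      simp only [] at htp
      subst htp
      rw [pvSegs_cons, pvPart_cons, hch, List.flatMap_cons, pvKeep_cons]
      have hdrop2 : ys.drop (i + 1 + c1.length) = c2 := by
        rw [show i + 1 + c1.length = i + (c1.length + 1) from by omega]
        rw [← List.drop_drop, hdrop, List.drop_succ_cons]
        exact List.drop_left ..
      have hrest := ihn c2
        (by simp only [List.length_cons, List.length_append] at hl; omega)
        ys (i + 1 + c1.length) hdrop2
      rw [hrest]
      congr 1
      have hcond : (m ≤ ((i + 1 + c1.length : Nat) : Int) - ((i : Nat) : Int))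
          ↔ (m ≤ (((x :: c1).length : Nat) : Int)) := by
        simp only [List.length_cons]
        push_cast
        omega
      have hslice : (ys.drop i).take (i + 1 + c1.length - i) = x :: c1 := by
        rw [hdrop, show i + 1 + c1.length - i = (x :: c1).length from by simp; omega]
        rw [show x :: (c1 ++ c2) = (x :: c1) ++ c2 from rfl]
        exact List.take_left ..
      split
      · rw [hslice, if_pos (hcond.mp ‹_›)]
      · rw [if_neg (fun hh => ‹¬ _› (hcond.mpr hh))]

theorem pvB_eq (indices : List Int) (m : Int) :
    filter_consecutive_py_alt indices m
      = pvKeep m (pvPart (PySem.List.sorted indices (fun x => x) false)) := by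
  unfold filter_consecutive_py_alt
  cases hs : PySem.List.sorted indices (fun x => x) false with
  | nil =>
    show (if m ≤ (0 : Int) - 0
        then ([] : List Int) ++ PySem.List.slice ([] : List Int) (some 0) (some 0) else [])
      = pvKeep m (pvPart [])
    rw [pvPart_nil]
    split <;> rfl
  | cons x t =>
    simp only [PySem.List.slice_from_one, List.tail_cons]
    have hbr : (List.filter (fun p => !(p.2.2 == p.2.1 + 1))
          (PySem.List.enumerate ((x :: t).zip t) 0)).map (fun p => p.1 + 1)
        = (pvSegs 0 (x :: t)).tail.map (fun ab => (ab.1 : Int)) := by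
      have h0 := pvEAux_eq_segs t x 0
      simpa [pvEAux, PySem.List.slice_from_one] using h0
    rw [hbr]
    have hz := pvZip_eq_segs t.length t x le_rfl 0
    simp only [Nat.zero_add, Nat.cast_zero] at hz
    simp only [List.cons_append, List.nil_append, List.tail_cons]
    rw [hz]
    rw [PySem.List.foldl_ite_eq_foldl_filter
      (p := fun ab : Int × Int => m ≤ ab.2 - ab.1)
      (f := fun out ab => out ++ PySem.List.slice (x :: t) (some ab.1) (some ab.2))]
    rw [PySem.List.foldl_append_eq_flatMap
      (g := fun ab : Int × Int => PySem.List.slice (x :: t) (some ab.1) (some ab.2))]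
    rw [List.nil_append, ← pvFlatMap_if]
    rw [List.flatMap_map]
    dsimp only
    simp only [PySem.List.slice_natCast]
    exact pvSegs_flatMap m (x :: t).length (x :: t) le_rfl (x :: t) 0 List.drop_zero

-- ===== VERDICT (by name: the statement is the Claim_ definition above) =====
theorem filter_consecutive_py_spec : Claim_equal_filter_consecutive_py := by
  intro indices m _
  unfold Spec_filter_consecutive_py
  rw [pvA_eq, pvB_eq]
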